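-- pv_equiv track=rewrite | github.com/nribjoaovictor/python_exercicios | listas_e_matriz/itensvazios.py | remove_itens
-- ===== SOURCE A (Python) =====
-- def remove_itens(d):
-- #     dicionario={}
-- #     for i in d.keys():
-- #         if d[i]!=None:
-- #             dicionario[i]=d[i]
-- #     return dicionario
--     lst=[]
--     for k in d.keys():
--         if d[k]==None:
--             lst.append(k)
--     for k in lst:
--         del d[k]
--     return d
-- ===== SOURCE B (Python) =====
-- def remove_itens(d):
--     kept = {k: v for k, v in d.items() if not (v == None)}
--     d.clear()
--     d.update(kept)
--     return d
-- ===== Notes on version B (the rewrite author's own statement) =====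
-- stated objective: idiomatic
-- what changed: Replaces A's two-phase collect-None-keys-then-delete loops with a single dict-comprehension that builds the kept entries, then clear()+update() to overwrite the dict's contents in place.
import Mathlib
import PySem

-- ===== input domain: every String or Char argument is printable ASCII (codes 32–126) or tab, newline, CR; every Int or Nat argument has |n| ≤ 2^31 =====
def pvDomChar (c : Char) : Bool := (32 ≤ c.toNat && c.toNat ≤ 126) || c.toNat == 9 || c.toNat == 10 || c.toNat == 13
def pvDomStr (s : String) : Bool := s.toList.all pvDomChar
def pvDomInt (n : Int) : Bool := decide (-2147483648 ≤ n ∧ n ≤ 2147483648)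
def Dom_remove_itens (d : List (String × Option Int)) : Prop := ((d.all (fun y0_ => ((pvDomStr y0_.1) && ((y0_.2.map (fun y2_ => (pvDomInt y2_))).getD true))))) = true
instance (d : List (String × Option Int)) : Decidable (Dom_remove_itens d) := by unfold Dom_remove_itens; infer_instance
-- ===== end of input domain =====

-- ===== PORT A =====
-- A: collect the keys whose value == None into lst, then delete each from the dict, return d.
def remove_itens (d : List (String × Option Int)) : List (String × Option Int) :=
  let dd := PySem.Dict.ofList d
  let lst := dd.keys.foldl (fun lst k => if dd.getD k none == none then lst ++ [k] else lst) []
  (lst.foldl (fun dd k => dd.erase k) dd).items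

-- ===== PORT B =====
-- B: one comprehension keeping the non-None items, then clear()+update(kept) in place.
def remove_itens_alt (d : List (String × Option Int)) : List (String × Option Int) :=
  let dd := PySem.Dict.ofList d
  let kept := dd.items.foldl
    (fun acc p => if !(p.2 == (none : Option Int)) then acc.insert p.1 p.2 else acc)
    (PySem.Dict.empty : PySem.Dict String (Option Int))
  ((PySem.Dict.empty : PySem.Dict String (Option Int)).update kept.items).items

-- ===== PRECONDITION & SPEC =====
def Spec_remove_itens (d : List (String × Option Int)) (out : List (String × Option Int)) : Prop := out = remove_itens_alt d
instance (d : List (String × Option Int)) (out : List (String × Option Int)) : Decidable (Spec_remove_itens d out) := by unfold Spec_remove_itens; infer_instance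

-- ===== CLAIM (what is proved, stated in full; the proofs are below) =====
def Claim_equal_remove_itens : Prop := ∀ (d : List (String × Option Int)), Dom_remove_itens d → Spec_remove_itens d (remove_itens d)

-- ===== LEMMAS AND PROOFS =====

-- ===== VERDICT (by name: the statement is the Claim_ definition above) =====
-- fold of erases = one filter
theorem foldl_erase_items (lst : List String) (dd : PySem.Dict String (Option Int)) :
    (lst.foldl (fun dd k => dd.erase k) dd).items
      = dd.items.filter (fun p => !lst.contains p.1) := by
  induction lst generalizing dd with
  | nil => simp
  | cons k ks ih =>
      rw [List.foldl_cons, ih]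
      simp only [PySem.Dict.erase, List.filter_filter]
      apply List.filter_congr
      intro p _
      simp only [List.contains_cons]
      cases h : (p.1 == k) <;> simp_all

-- fold with an 'if keep' guard = fold of inserts over the filtered list
theorem foldl_insert_if (l : List (String × Option Int))
    (acc : PySem.Dict String (Option Int)) :
    l.foldl (fun acc p => if !(p.2 == (none : Option Int)) then acc.insert p.1 p.2 else acc) acc
      = (l.filter (fun p => !(p.2 == (none : Option Int)))).foldl
          (fun acc p => acc.insert p.1 p.2) acc := by
  induction l generalizing acc with
  | nil => rfl
  | cons p ps ih =>
      rw [List.foldl_cons, List.filter_cons]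
      by_cases h : (!(p.2 == (none : Option Int))) = true
      · rw [if_pos h, if_pos h, List.foldl_cons, ih]
      · rw [if_neg h, if_neg h, ih]

theorem remove_itens_spec : Claim_equal_remove_itens := by
  intro d _
  unfold Spec_remove_itens
  simp only [remove_itens, remove_itens_alt]
  obtain ⟨dd, hdd⟩ : ∃ dd, PySem.Dict.ofList d = dd := ⟨_, rfl⟩
  have hnd : dd.keys.Nodup := hdd ▸ PySem.Dict.nodup_keys_ofList d
  rw [hdd]
  -- A side
  rw [PySem.List.foldl_append_if_eq_filter, List.nil_append, foldl_erase_items]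
  -- B side
  rw [foldl_insert_if]
  have hfresh : ∀ p ∈ dd.items.filter (fun p => !(p.2 == (none : Option Int))),
      (PySem.Dict.empty : PySem.Dict String (Option Int)).contains p.1 = false := by
    intro p _; simp
  have hkeysnd : ((dd.items.filter (fun p => !(p.2 == (none : Option Int)))).map (·.1)).Nodup := by
    have : dd.keys = dd.items.map (·.1) := rfl
    rw [this] at hnd
    exact hnd.sublist (List.Sublist.map _ List.filter_sublist)
  have hkept : ((dd.items.filter (fun p => !(p.2 == (none : Option Int)))).foldl
      (fun acc p => acc.insert p.1 p.2) (PySem.Dict.empty : PySem.Dict String (Option Int))).items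
        = dd.items.filter (fun p => !(p.2 == (none : Option Int))) := by
    have := PySem.Dict.items_foldl_insert_fresh
      (l := dd.items.filter (fun p => !(p.2 == (none : Option Int))))
      (k := (·.1)) (v := (·.2)) (d := (PySem.Dict.empty : PySem.Dict String (Option Int)))
      hfresh hkeysnd
    simpa using this
  rw [hkept, PySem.Dict.update, hkept]
  -- both sides are filters of dd.items; the predicates agree on its members
  apply List.filter_congr
  intro p hp
  have h1 : dd.getD p.1 none = p.2 := by
    have hp' : (p.1, p.2) ∈ dd.items := by simpa using hp
    exact PySem.Dict.getD_of_mem_items (d := dd) hp' hnd none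
  have hk : p.1 ∈ dd.keys := PySem.Dict.mem_keys_of_mem_items dd hp
  simp only [List.contains_eq_mem, List.mem_filter, hk, h1, true_and]
  cases p.2 <;> simp
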